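-- pv_equiv track=rewrite | github.com/feirik/Writeups | guessing_game_4/solve.py | make_list_twelvth
-- ===== SOURCE A (Python) =====
-- def make_list_twelvth(false_count_list):
--     zero_false_list = []
--     one_false_list = []
--     two_false_list = []
--     three_false_list = []
--
--     iter = 0
--     for i in false_count_list:
--         if i == 0:
--             zero_false_list.append(iter)
--         if i == 1:
--             one_false_list.append(iter)
--         if i == 2:
--             two_false_list.append(iter)
--         if i == 3:
--             three_false_list.append(iter)
--         iter += 1
--
--     remove_zero = zero_false_list[0:1]
--     remove_one = one_false_list[:11]
--     remove_two = two_false_list[:55]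
--     remove_three = three_false_list[:165]
--
--     test_list = remove_zero + remove_one + remove_two + remove_three
--
--     return test_list
-- ===== SOURCE B (Python) =====
-- def make_list_twelvth(false_count_list):
--     def collect(val, n):
--         out = []
--         for idx, x in enumerate(false_count_list):
--             if x == val:
--                 out.append(idx)
--                 if len(out) == n:
--                     break
--         return out
--     return collect(0, 1) + collect(1, 11) + collect(2, 55) + collect(3, 165)
-- ===== Notes on version B (the rewrite author's own statement) =====
-- stated objective: alternative
-- what changed: Replaces the single bucketing pass (four accumulator lists plus a manual counter, then four slices) by a helper that makes four separate enumerate scans, each breaking early once its quota of indices (1/11/55/165) is collected.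
import Mathlib
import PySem

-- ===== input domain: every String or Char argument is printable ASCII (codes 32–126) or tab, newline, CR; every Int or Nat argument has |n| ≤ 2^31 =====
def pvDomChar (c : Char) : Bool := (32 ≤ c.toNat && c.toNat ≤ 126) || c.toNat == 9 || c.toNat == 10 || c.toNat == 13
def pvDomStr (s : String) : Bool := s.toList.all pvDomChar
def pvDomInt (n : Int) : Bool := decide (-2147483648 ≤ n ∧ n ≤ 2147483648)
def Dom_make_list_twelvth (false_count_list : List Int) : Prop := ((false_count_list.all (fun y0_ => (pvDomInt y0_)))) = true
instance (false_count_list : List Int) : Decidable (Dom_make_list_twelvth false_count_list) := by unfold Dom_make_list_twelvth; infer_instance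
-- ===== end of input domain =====

-- B makes four separate early-terminating scans instead of A's single bucketing pass; same cost, different decomposition.

-- ===== PORT A =====
-- state: (zero_false_list, one_false_list, two_false_list, three_false_list, iter)
def make_list_twelvth (false_count_list : List Int) : List Int :=
  let st := false_count_list.foldl
    (fun (s : List Int × List Int × List Int × List Int × Int) i =>
      let z := if i = 0 then s.1 ++ [s.2.2.2.2] else s.1
      let o := if i = 1 then s.2.1 ++ [s.2.2.2.2] else s.2.1
      let t := if i = 2 then s.2.2.1 ++ [s.2.2.2.2] else s.2.2.1
      let th := if i = 3 then s.2.2.2.1 ++ [s.2.2.2.2] else s.2.2.2.1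
      (z, o, t, th, s.2.2.2.2 + 1))
    ([], [], [], [], 0)
  let remove_zero := PySem.List.slice st.1 (some 0) (some 1)
  let remove_one := PySem.List.slice st.2.1 none (some 11)
  let remove_two := PySem.List.slice st.2.2.1 none (some 55)
  let remove_three := PySem.List.slice st.2.2.2.1 none (some 165)
  remove_zero ++ remove_one ++ remove_two ++ remove_three

-- ===== PORT B =====
-- collect val n: scan with enumerate, append each matching index, break once n are collected
def pvCollect (val : Int) (n : Nat) (idx : Int) : List Int → List Int
  | [] => []
  | x :: xs =>
    if x = val then
      idx :: (if n = 1 then [] else pvCollect val (n - 1) (idx + 1) xs)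
    else pvCollect val n (idx + 1) xs

def make_list_twelvth_alt (false_count_list : List Int) : List Int :=
  pvCollect 0 1 0 false_count_list ++ pvCollect 1 11 0 false_count_list ++
  pvCollect 2 55 0 false_count_list ++ pvCollect 3 165 0 false_count_list

-- ===== PRECONDITION & SPEC =====
def Spec_make_list_twelvth (false_count_list : List Int) (out : List Int) : Prop := out = make_list_twelvth_alt false_count_list
instance (false_count_list : List Int) (out : List Int) : Decidable (Spec_make_list_twelvth false_count_list out) := by unfold Spec_make_list_twelvth; infer_instance

-- ===== CLAIM (what is proved, stated in full; the proofs are below) =====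
def Claim_equal_make_list_twelvth : Prop := ∀ (false_count_list : List Int), Dom_make_list_twelvth false_count_list → Spec_make_list_twelvth false_count_list (make_list_twelvth false_count_list)

-- ===== LEMMAS AND PROOFS =====

-- the indices (counted from idx) at which val occurs
def pvIdxOf (val : Int) (idx : Int) : List Int → List Int
  | [] => []
  | x :: xs => if x = val then idx :: pvIdxOf val (idx + 1) xs else pvIdxOf val (idx + 1) xs

lemma pvCollect_eq_take (val : Int) (n : Nat) (hn : 1 ≤ n) (idx : Int) (l : List Int) :
    pvCollect val n idx l = (pvIdxOf val idx l).take n := by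
  induction l generalizing n idx with
  | nil => simp [pvCollect, pvIdxOf]
  | cons x xs ih =>
    by_cases h : x = val
    · simp only [pvCollect, pvIdxOf, if_pos h]
      by_cases h1 : n = 1
      · subst h1; simp
      · rw [if_neg h1, ih (n - 1) (by omega)]
        obtain ⟨m, rfl⟩ : ∃ m, n = m + 1 := ⟨n - 1, by omega⟩
        simp
    · simp only [pvCollect, pvIdxOf, if_neg h]
      exact ih n hn (idx + 1)

lemma foldl_buckets (l : List Int) (z o t th : List Int) (c : Int) :
    l.foldl
      (fun (s : List Int × List Int × List Int × List Int × Int) i =>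
        let z := if i = 0 then s.1 ++ [s.2.2.2.2] else s.1
        let o := if i = 1 then s.2.1 ++ [s.2.2.2.2] else s.2.1
        let t := if i = 2 then s.2.2.1 ++ [s.2.2.2.2] else s.2.2.1
        let th := if i = 3 then s.2.2.2.1 ++ [s.2.2.2.2] else s.2.2.2.1
        (z, o, t, th, s.2.2.2.2 + 1))
      (z, o, t, th, c)
    = (z ++ pvIdxOf 0 c l, o ++ pvIdxOf 1 c l, t ++ pvIdxOf 2 c l, th ++ pvIdxOf 3 c l,
       c + l.length) := by
  induction l generalizing z o t th c with
  | nil => simp [pvIdxOf]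
  | cons x xs ih =>
    simp only [List.foldl_cons, ih]
    simp only [pvIdxOf]
    split_ifs <;> simp <;> omega

theorem make_list_twelvth_spec : Claim_equal_make_list_twelvth := by
  intro l _
  show make_list_twelvth l = make_list_twelvth_alt l
  unfold make_list_twelvth make_list_twelvth_alt
  rw [foldl_buckets]
  simp only []
  rw [pvCollect_eq_take 0 1 (by omega), pvCollect_eq_take 1 11 (by omega),
      pvCollect_eq_take 2 55 (by omega), pvCollect_eq_take 3 165 (by omega)]
  have h1 : ∀ (v b : Int), 0 ≤ b → PySem.List.slice (pvIdxOf v 0 l) none (some b)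
      = (pvIdxOf v 0 l).take b.toNat := by
    intro v b hb
    rw [PySem.List.slice_to _ hb]
  simp only [List.nil_append, PySem.List.slice_zero_start]
  rw [h1 0 1 (by norm_num), h1 1 11 (by norm_num), h1 2 55 (by norm_num), h1 3 165 (by norm_num)]
  norm_num [Int.toNat]
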